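-- pv_equiv track=rewrite | github.com/AJ-618/DSA | hashing/longest_common_subarray_given_sum.py | longest_common_subarr_2_arr
-- ===== SOURCE A (Python) =====
-- def longest_common_subarr_2_arr(arr1: list, arr2: list):
--     """Longest common subarr b/n two arr's"""
--
--     def _compute_diff(arr1: list, arr2: list) -> list:
--         "compute a diff array from the two arrays"
--
--         n = len(arr1)
--         res = [0] * n
--
--         for i in range(n):
--             res[i] = arr1[i] - arr2[i]
--
--         return res
--
--     # Return the length of the longest subarr with sum 0
--     def _longest_subarr_given_sum(arr: list, k: int) -> int:
--         """Find the len of the longest subarr with the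
--         given sum"""
--
--         m = {}
--
--         n = len(arr)
--         pre_sum = 0
--         res = 0
--
--         for i in range(n):
--             pre_sum += arr[i]
--
--             if pre_sum == k:
--                 res = i + 1
--
--             if pre_sum not in m:
--                 m[pre_sum] = i
--
--             if pre_sum - k in m:
--                 res = max(res, i - m[pre_sum - k])
--
--         return res
--
--     # Compute diff of the two arrays
--     diff_arr = _compute_diff(arr1, arr2)
--
--     # return the length of the longest subarray with sum 0
--     return _longest_subarr_given_sum(diff_arr, 0)
-- ===== SOURCE B (Python) =====
-- def longest_common_subarr_2_arr(arr1: list, arr2: list):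
--     """Longest common subarr b/n two arr's"""
--     n = len(arr1)
--     best = 0
--     for i in range(n):
--         s = 0
--         for j in range(i, n):
--             s += arr1[j] - arr2[j]
--             if s == 0:
--                 best = max(best, j - i + 1)
--     return best
-- ===== Notes on version B (the rewrite author's own statement) =====
-- stated objective: simpler
-- what changed: Replaced A's one-pass prefix-sum hashmap with a plain brute-force scan: for every start index accumulate the running difference sum and record the longest window whose sum is zero (no diff array, no dict, no prefix sums).
import Mathlib
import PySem

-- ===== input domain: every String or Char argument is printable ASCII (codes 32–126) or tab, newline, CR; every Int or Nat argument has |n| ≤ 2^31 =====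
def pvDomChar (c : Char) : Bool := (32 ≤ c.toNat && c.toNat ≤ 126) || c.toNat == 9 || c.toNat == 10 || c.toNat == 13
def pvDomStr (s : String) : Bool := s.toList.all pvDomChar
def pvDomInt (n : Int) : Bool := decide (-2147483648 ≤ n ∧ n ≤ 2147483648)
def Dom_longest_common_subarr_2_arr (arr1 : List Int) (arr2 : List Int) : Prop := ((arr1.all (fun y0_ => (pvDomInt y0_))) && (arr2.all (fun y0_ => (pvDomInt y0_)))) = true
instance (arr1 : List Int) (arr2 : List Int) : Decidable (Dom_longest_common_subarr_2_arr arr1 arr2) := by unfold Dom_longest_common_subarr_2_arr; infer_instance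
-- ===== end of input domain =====

-- B replaces A's one-pass prefix-sum hashmap by a plain brute-force scan over all start
-- indices with a running window sum (simpler, not faster); equivalence is about the return
-- value on inputs where A does not raise (Pre_ excludes len(arr2) < len(arr1): IndexError).

-- ===== PORT A =====
-- _compute_diff: res[i] = arr1[i] - arr2[i] for i in range(len(arr1)); arr2[i] raises
-- IndexError when arr2 is shorter — those inputs are excluded by Pre_ below.
def pvComputeDiff (arr1 : List Int) (arr2 : List Int) : List Int :=
  (PySem.List.pyRange 0 (arr1.length : Int) 1).map (fun i =>
    PySem.List.pyGetD arr1 i 0 - PySem.List.pyGetD arr2 i 0)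

-- _longest_subarr_given_sum: one pass with a dict of first prefix-sum occurrences
def pvLongestSubarrGivenSum (arr : List Int) (k : Int) : Int :=
  (PySem.List.pyRange 0 (arr.length : Int) 1).foldl
    (fun (st : PySem.Dict Int Int × Int × Int) i =>
      let m := st.1
      let preSum := st.2.1 + PySem.List.pyGetD arr i 0
      let res := st.2.2
      let res := if preSum == k then i + 1 else res
      let m := if !(m.contains preSum) then m.insert preSum i else m
      let res := if m.contains (preSum - k) then max res (i - m.getD (preSum - k) 0) else res
      (m, preSum, res))
    (PySem.Dict.empty, 0, 0) |>.2.2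

def longest_common_subarr_2_arr (arr1 : List Int) (arr2 : List Int) : Int :=
  pvLongestSubarrGivenSum (pvComputeDiff arr1 arr2) 0

-- ===== PORT B =====
-- inner loop of Source B: for j in range(i, n): s += arr1[j] - arr2[j]; if s == 0: best = max(best, j-i+1)
def pvInner (arr1 : List Int) (arr2 : List Int) (n : Int) (i : Int) (best : Int) : Int :=
  ((PySem.List.pyRange i n 1).foldl
    (fun (st : Int × Int) j =>
      let s := st.1 + (PySem.List.pyGetD arr1 j 0 - PySem.List.pyGetD arr2 j 0)
      (s, if s == 0 then max st.2 (j - i + 1) else st.2))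
    (0, best)).2

def longest_common_subarr_2_arr_alt (arr1 : List Int) (arr2 : List Int) : Int :=
  (PySem.List.pyRange 0 (arr1.length : Int) 1).foldl
    (fun best i => pvInner arr1 arr2 (arr1.length : Int) i best) 0

-- ===== PRECONDITION & SPEC =====
-- Pre_ excludes exactly the inputs where A raises IndexError: arr2 shorter than arr1.
def Pre_longest_common_subarr_2_arr (arr1 : List Int) (arr2 : List Int) : Prop :=
  arr1.length ≤ arr2.length
instance (arr1 : List Int) (arr2 : List Int) : Decidable (Pre_longest_common_subarr_2_arr arr1 arr2) := by unfold Pre_longest_common_subarr_2_arr; infer_instance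
def pvWitness_longest_common_subarr_2_arr : List Int × List Int := ([1, 2, 3], [3, 2, 1])

def Spec_longest_common_subarr_2_arr (arr1 : List Int) (arr2 : List Int) (out : Int) : Prop := out = longest_common_subarr_2_arr_alt arr1 arr2
instance (arr1 : List Int) (arr2 : List Int) (out : Int) : Decidable (Spec_longest_common_subarr_2_arr arr1 arr2 out) := by unfold Spec_longest_common_subarr_2_arr; infer_instance

-- ===== CLAIM (what is proved, stated in full; the proofs are below) =====
def Claim_equal_longest_common_subarr_2_arr : Prop := ∀ (arr1 : List Int) (arr2 : List Int), Dom_longest_common_subarr_2_arr arr1 arr2 → Pre_longest_common_subarr_2_arr arr1 arr2 → Spec_longest_common_subarr_2_arr arr1 arr2 (longest_common_subarr_2_arr arr1 arr2)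

-- ===== LEMMAS AND PROOFS =====

def psum (d : List Int) (j : Nat) : Int := (d.take j).sum
def fidx (d : List Int) (j : Nat) : Nat := Nat.find (p := fun i => psum d i = psum d j) ⟨j, rfl⟩

theorem psum_zero (d : List Int) : psum d 0 = 0 := rfl

theorem psum_succ (d : List Int) (t : Nat) (h : t < d.length) :
    psum d (t + 1) = psum d t + d[t] := by
  exact List.sum_take_succ d t h

theorem fidx_le (d : List Int) (j : Nat) : fidx d j ≤ j := Nat.find_min' _ rfl

theorem fidx_spec (d : List Int) (j : Nat) : psum d (fidx d j) = psum d j := Nat.find_spec (p := fun i => psum d i = psum d j) ⟨j, rfl⟩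

-- ref t = A's running best after t iterations (proved below via the dict invariant)
def ref (d : List Int) : Nat → Int
  | 0 => 0
  | t + 1 => max (ref d t) ((t + 1 : Int) - (fidx d (t + 1) : Int))

theorem lcsa_ref_le (d : List Int) (t : Nat) : ref d t ≤ (t : Int) := by
  induction t with
  | zero => simp [ref]
  | succ t ih =>
    simp only [ref]
    have : (0 : Int) ≤ (fidx d (t+1) : Int) := by positivity
    push_cast
    omega

def mval (d : List Int) (t : Nat) (s : Int) : Option Int :=
  if h : ∃ i, i < t ∧ psum d (i + 1) = s then some ((Nat.find h : Nat) : Int) else none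

def AFold (d : List Int) (t : Nat) : PySem.Dict Int Int × Int × Int :=
  (PySem.List.pyRange 0 (t : Int) 1).foldl
    (fun st i =>
      let m := st.1
      let preSum := st.2.1 + PySem.List.pyGetD d i 0
      let res := st.2.2
      let res := if preSum == (0 : Int) then i + 1 else res
      let m := if !(m.contains preSum) then m.insert preSum i else m
      let res := if m.contains (preSum - 0) then max res (i - m.getD (preSum - 0) 0) else res
      (m, preSum, res))
    (PySem.Dict.empty, 0, 0)

theorem mval_succ_ne (d : List Int) (t : Nat) (s : Int) (h : psum d (t + 1) ≠ s) :
    mval d (t + 1) s = mval d t s := by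
  have hiff : ∀ {i : Nat}, (i < t + 1 ∧ psum d (i + 1) = s) ↔ (i < t ∧ psum d (i + 1) = s) := by
    intro i
    constructor
    · rintro ⟨h1, h2⟩
      refine ⟨?_, h2⟩
      rcases Nat.lt_succ_iff_lt_or_eq.mp h1 with h' | h'
      · exact h'
      · subst h'; exact absurd h2 h
    · rintro ⟨h1, h2⟩; exact ⟨by omega, h2⟩
  unfold mval
  by_cases hex : ∃ i, i < t ∧ psum d (i + 1) = s
  · have hex' : ∃ i, i < t + 1 ∧ psum d (i + 1) = s := ⟨hex.choose, hiff.mpr hex.choose_spec⟩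
    rw [dif_pos hex', dif_pos hex]
    congr 2
    exact Nat.find_congr' hiff
  · rw [dif_neg, dif_neg hex]
    rintro ⟨i, hi⟩
    exact hex ⟨i, hiff.mp hi⟩

-- widx: first diff index i ≤ t whose prefix sum psum (i+1) equals psum (t+1)
def widx (d : List Int) (t : Nat) : Nat :=
  Nat.find (p := fun i => i < t + 1 ∧ psum d (i + 1) = psum d (t + 1)) ⟨t, Nat.lt_succ_self t, rfl⟩

theorem mval_succ_self (d : List Int) (t : Nat) :
    mval d (t + 1) (psum d (t + 1)) = some ((widx d t : Nat) : Int) := by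
  unfold mval widx
  rw [dif_pos ⟨t, Nat.lt_succ_self t, rfl⟩]

theorem widx_of_none (d : List Int) (t : Nat)
    (h : ¬ ∃ i, i < t ∧ psum d (i + 1) = psum d (t + 1)) : widx d t = t := by
  unfold widx
  rw [Nat.find_eq_iff]
  refine ⟨⟨Nat.lt_succ_self t, rfl⟩, ?_⟩
  rintro i hi ⟨_, h2⟩
  exact h ⟨i, hi, h2⟩

theorem widx_of_some (d : List Int) (t : Nat)
    (h : ∃ i, i < t ∧ psum d (i + 1) = psum d (t + 1)) : widx d t = Nat.find h := by
  have hw1 : widx d t ≤ Nat.find h := by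
    apply Nat.find_min'
    exact ⟨by have := (Nat.find_spec h).1; omega, (Nat.find_spec h).2⟩
  have hf : Nat.find h < t := (Nat.find_spec h).1
  have hw2 : Nat.find h ≤ widx d t := by
    apply Nat.find_min'
    refine ⟨by omega, ?_⟩
    exact (Nat.find_spec (p := fun i => i < t + 1 ∧ psum d (i + 1) = psum d (t + 1)) ⟨t, Nat.lt_succ_self t, rfl⟩).2
  omega

theorem widx_le (d : List Int) (t : Nat) : widx d t ≤ t := by
  have := (Nat.find_spec (p := fun i => i < t + 1 ∧ psum d (i + 1) = psum d (t + 1)) ⟨t, Nat.lt_succ_self t, rfl⟩).1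
  unfold widx
  omega

theorem widx_psum (d : List Int) (t : Nat) : psum d (widx d t + 1) = psum d (t + 1) :=
  (Nat.find_spec (p := fun i => i < t + 1 ∧ psum d (i + 1) = psum d (t + 1)) ⟨t, Nat.lt_succ_self t, rfl⟩).2

theorem fidx_zero_of (d : List Int) (j : Nat) (h : psum d j = 0) : fidx d j = 0 := by
  unfold fidx
  rw [Nat.find_eq_zero]
  simpa [psum] using h.symm

theorem fidx_eq_widx_succ (d : List Int) (t : Nat) (h : psum d (t + 1) ≠ 0) :
    fidx d (t + 1) = widx d t + 1 := by
  have h1 : fidx d (t + 1) ≤ widx d t + 1 := Nat.find_min' _ (widx_psum d t)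
  have h0 : fidx d (t + 1) ≠ 0 := by
    intro h0
    have := Nat.find_spec (p := fun i => psum d i = psum d (t+1)) ⟨t+1, rfl⟩
    rw [show Nat.find _ = fidx d (t+1) from rfl, h0] at this
    exact h (by simpa [psum] using this.symm)
  obtain ⟨f, hf⟩ : ∃ f, fidx d (t + 1) = f + 1 := ⟨fidx d (t+1) - 1, by omega⟩
  have hspec : psum d (f + 1) = psum d (t + 1) := by
    have := Nat.find_spec (p := fun i => psum d i = psum d (t+1)) ⟨t+1, rfl⟩
    rwa [show Nat.find _ = fidx d (t+1) from rfl, hf] at this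
  rw [hf] at h1
  have hwle := widx_le d t
  have h2 : widx d t ≤ f := Nat.find_min' _ ⟨by omega, hspec⟩
  rw [hf]
  omega

theorem lcsa_inv (d : List Int) : ∀ t : Nat, t ≤ d.length →
    (AFold d t).2.1 = psum d t ∧ (AFold d t).2.2 = ref d t ∧
    ∀ s : Int, (AFold d t).1.get? s = mval d t s := by
  intro t
  induction t with
  | zero =>
    intro _
    have h0 : PySem.List.pyRange 0 ((0 : Nat) : Int) 1 = [] := by
      rw [Nat.cast_zero]
      exact PySem.List.pyRange_one_eq_nil (le_refl 0)
    refine ⟨?_, ?_, ?_⟩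
    · simp only [AFold, h0, List.foldl_nil]; rfl
    · simp only [AFold, h0, List.foldl_nil]; rfl
    · intro s
      simp only [AFold, h0, List.foldl_nil]
      rw [PySem.Dict.get?_empty, mval, dif_neg]
      rintro ⟨i, hi, _⟩
      omega
  | succ t ih =>
    intro ht
    obtain ⟨hp, hr, hm⟩ := ih (by omega)
    have hsucc : AFold d (t + 1)
        = (fun (st : PySem.Dict Int Int × Int × Int) (i : Int) =>
            let m := st.1
            let preSum := st.2.1 + PySem.List.pyGetD d i 0
            let res := st.2.2
            let res := if preSum == (0:Int) then i + 1 else res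
            let m := if !(m.contains preSum) then m.insert preSum i else m
            let res := if m.contains (preSum - 0) then max res (i - m.getD (preSum - 0) 0) else res
            (m, preSum, res)) (AFold d t) (t : Int) := by
      unfold AFold
      rw [show ((t + 1 : Nat) : Int) = (t : Int) + 1 by push_cast; ring,
        PySem.List.pyRange_one_succ_right (by positivity), List.foldl_append]
      rfl
    rw [hsucc]
    dsimp only
    have htlt : t < d.length := by omega
    have hS : (AFold d t).2.1 + PySem.List.pyGetD d (t : Int) 0 = psum d (t + 1) := by
      rw [hp, PySem.List.pyGetD_natCast, List.getD_eq_getElem d 0 htlt, psum_succ d t htlt]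
    rw [hS, hr]
    have hcont : ∀ x : Int, (AFold d t).1.contains x = (mval d t x).isSome := by
      intro x
      rw [PySem.Dict.contains_eq_isSome_get?, hm]
    by_cases hex : ∃ i, i < t ∧ psum d (i + 1) = psum d (t + 1)
    · -- prefix sum seen before: dict unchanged
      have hv : mval d t (psum d (t + 1)) = some ((Nat.find hex : Nat) : Int) := by
        rw [mval, dif_pos hex]
      have hw : widx d t = Nat.find hex := widx_of_some d t hex
      have hmne : (if !((AFold d t).1.contains (psum d (t + 1))) then
            (AFold d t).1.insert (psum d (t + 1)) ((t : Nat) : Int) else (AFold d t).1)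
          = (AFold d t).1 := by
        rw [hcont, hv]
        simp
      rw [hmne]
      have hcont2 : (AFold d t).1.contains (psum d (t + 1) - 0) = true := by
        rw [sub_zero, hcont, hv]
        simp
      have hgetD : (AFold d t).1.getD (psum d (t + 1) - 0) 0 = ((widx d t : Nat) : Int) := by
        rw [sub_zero, PySem.Dict.getD_eq_get?_getD, hm, hv, hw, Option.getD_some]
      rw [if_pos hcont2, hgetD]
      refine ⟨rfl, ?_, ?_⟩
      · by_cases h0 : psum d (t + 1) = 0
        · rw [if_pos (by simpa using h0)]
          have hfx : fidx d (t + 1) = 0 := fidx_zero_of d (t + 1) h0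
          have hle : ref d t ≤ (t : Int) := lcsa_ref_le d t
          have hwn : (0 : Int) ≤ ((widx d t : Nat) : Int) := by positivity
          simp only [ref, hfx]
          push_cast
          omega
        · rw [if_neg (by simpa using h0)]
          have hfx : fidx d (t + 1) = widx d t + 1 := fidx_eq_widx_succ d t h0
          simp only [ref, hfx]
          congr 1
          push_cast
          ring
      · intro s
        by_cases hs : s = psum d (t + 1)
        · subst hs
          rw [hm, hv, mval_succ_self, hw]
        · rw [hm, mval_succ_ne d t s (fun h => hs h.symm)]
    · -- fresh prefix sum: inserted
      have hv : mval d t (psum d (t + 1)) = none := by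
        rw [mval, dif_neg hex]
      have hw : widx d t = t := widx_of_none d t hex
      have hmins : (if !((AFold d t).1.contains (psum d (t + 1))) then
            (AFold d t).1.insert (psum d (t + 1)) ((t : Nat) : Int) else (AFold d t).1)
          = (AFold d t).1.insert (psum d (t + 1)) ((t : Nat) : Int) := by
        rw [hcont, hv]
        simp
      rw [hmins]
      have hcont2 : ((AFold d t).1.insert (psum d (t + 1)) ((t : Nat) : Int)).contains
          (psum d (t + 1) - 0) = true := by
        rw [sub_zero]
        exact PySem.Dict.contains_insert_self _ _ _
      rw [if_pos hcont2, sub_zero, PySem.Dict.getD_eq_get?_getD, PySem.Dict.get?_insert_self,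
        Option.getD_some]
      refine ⟨rfl, ?_, ?_⟩
      · by_cases h0 : psum d (t + 1) = 0
        · rw [if_pos (by simpa using h0)]
          have hfx : fidx d (t + 1) = 0 := fidx_zero_of d (t + 1) h0
          have hle : ref d t ≤ (t : Int) := lcsa_ref_le d t
          simp only [ref, hfx]
          push_cast
          omega
        · rw [if_neg (by simpa using h0)]
          have hfx : fidx d (t + 1) = widx d t + 1 := fidx_eq_widx_succ d t h0
          simp only [ref, hfx, hw]
          congr 1
          push_cast
          ring
      · intro s
        by_cases hs : s = psum d (t + 1)
        · subst hs
          rw [PySem.Dict.get?_insert_self, mval_succ_self, hw]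
        · rw [PySem.Dict.get?_insert_of_ne _ _ hs, hm, mval_succ_ne d t s (fun h => hs h.symm)]

theorem lcsa_diff_eq (arr1 arr2 : List Int) (h : arr1.length ≤ arr2.length) :
    pvComputeDiff arr1 arr2 = (arr1.zip arr2).map (fun ab => ab.1 - ab.2) := by
  unfold pvComputeDiff
  rw [PySem.List.pyRange_one]
  apply List.ext_getElem
  · simp [List.length_zip]; omega
  · intro i h1 h2
    simp only [List.getElem_map, List.getElem_range, List.getElem_zip]
    simp only [List.length_map, List.length_range] at h1
    simp only [Int.sub_zero, Int.toNat_natCast] at h1 ⊢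
    rw [Int.zero_add, PySem.List.pyGetD_natCast, PySem.List.pyGetD_natCast,
      List.getD_eq_getElem _ _ (by omega), List.getD_eq_getElem _ _ (by omega)]

theorem lcsa_A_eq_ref (d : List Int) : pvLongestSubarrGivenSum d 0 = ref d d.length := by
  have h : pvLongestSubarrGivenSum d 0 = (AFold d d.length).2.2 := rfl
  rw [h, (lcsa_inv d d.length (le_refl _)).2.1]

-- ---- properties of ref: it is the maximum zero-sum window length ----

theorem ref_nonneg (d : List Int) (t : Nat) : 0 ≤ ref d t := by
  induction t with
  | zero => simp [ref]
  | succ t ih => simp only [ref]; exact le_max_of_le_left ih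

theorem ref_mono (d : List Int) (t : Nat) : ref d t ≤ ref d (t + 1) := by
  simp only [ref]; exact le_max_left _ _

theorem ref_ge_fidx (d : List Int) : ∀ t : Nat, ∀ j : Nat, j ≤ t →
    (j : Int) - (fidx d j : Int) ≤ ref d t := by
  intro t
  induction t with
  | zero =>
    intro j hj
    interval_cases j
    rw [fidx_zero_of d 0 (psum_zero d)]
    simp [ref]
  | succ t ih =>
    intro j hj
    rcases Nat.lt_succ_iff_lt_or_eq.mp (Nat.lt_succ_of_le hj) with h | h
    · exact le_trans (ih j (by omega)) (ref_mono d t)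
    · subst h
      simp only [ref]
      exact le_max_of_le_right (by push_cast; omega)

theorem ref_lb (d : List Int) (i k : Nat) (h1 : i + k < d.length)
    (h2 : psum d (i + k + 1) = psum d i) : (k : Int) + 1 ≤ ref d d.length := by
  have hfle : fidx d (i + k + 1) ≤ i := Nat.find_min' _ h2.symm
  have := ref_ge_fidx d d.length (i + k + 1) (by omega)
  have hcast : ((i + k + 1 : Nat) : Int) - (fidx d (i + k + 1) : Int) ≥ (k : Int) + 1 := by
    have : ((fidx d (i + k + 1) : Nat) : Int) ≤ (i : Int) := by exact_mod_cast hfle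
    push_cast
    omega
  omega

theorem ref_wit (d : List Int) : ∀ t : Nat, t ≤ d.length →
    ref d t = 0 ∨ ∃ i k : Nat, i + k < t ∧ psum d (i + k + 1) = psum d i ∧
      ref d t = (k : Int) + 1 := by
  intro t
  induction t with
  | zero => intro _; left; rfl
  | succ t ih =>
    intro ht
    rcases le_total ((t + 1 : Int) - (fidx d (t + 1) : Int)) (ref d t) with hle | hle
    · have hmax : ref d (t + 1) = ref d t := by simp only [ref]; exact max_eq_left hle
      rcases ih (by omega) with h | ⟨i, k, hik, hps, hv⟩
      · left; rw [hmax, h]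
      · right; exact ⟨i, k, by omega, hps, by rw [hmax, hv]⟩
    · have hmax : ref d (t + 1) = (t + 1 : Int) - (fidx d (t + 1) : Int) := by
        simp only [ref]; exact max_eq_right hle
      by_cases hft : fidx d (t + 1) = t + 1
      · left; rw [hmax, hft]; push_cast; ring
      · have hfle : fidx d (t + 1) ≤ t := by have := fidx_le d (t + 1); omega
        right
        refine ⟨fidx d (t + 1), t - fidx d (t + 1), by omega, ?_, ?_⟩
        · rw [show fidx d (t + 1) + (t - fidx d (t + 1)) + 1 = t + 1 by omega]
          exact (fidx_spec d (t + 1)).symm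
        · rw [hmax]
          have : ((fidx d (t + 1) : Nat) : Int) ≤ (t : Int) := by exact_mod_cast hfle
          omega

-- ---- B side: the brute-force double loop computes the same maximum ----

def dstep (d : List Int) (i : Int) (st : Int × Int) (j : Int) : Int × Int :=
  let s := st.1 + PySem.List.pyGetD d j 0
  (s, if s == 0 then max st.2 (j - i + 1) else st.2)

def innerFold (d : List Int) (i m : Nat) (b : Int) : Int × Int :=
  (PySem.List.pyRange (i : Int) ((i : Int) + (m : Int)) 1).foldl (dstep d (i : Int)) (0, b)

theorem inner_spec (d : List Int) (i : Nat) : ∀ (m : Nat) (b : Int), i + m ≤ d.length →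
    (innerFold d i m b).1 = psum d (i + m) - psum d i ∧
    b ≤ (innerFold d i m b).2 ∧
    (∀ k : Nat, k < m → psum d (i + k + 1) = psum d i → (k : Int) + 1 ≤ (innerFold d i m b).2) ∧
    ((innerFold d i m b).2 = b ∨ ∃ k : Nat, k < m ∧ psum d (i + k + 1) = psum d i ∧
      (innerFold d i m b).2 = (k : Int) + 1) := by
  intro m
  induction m with
  | zero =>
    intro b _
    have h0 : innerFold d i 0 b = (0, b) := by
      unfold innerFold
      rw [Nat.cast_zero, add_zero, PySem.List.pyRange_one_eq_nil (le_refl _), List.foldl_nil]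
    rw [h0]
    refine ⟨by simp, le_refl _, by omega, Or.inl rfl⟩
  | succ m ih =>
    intro b hm
    obtain ⟨hs, hb, hlb, hwit⟩ := ih b (by omega)
    have hstep : innerFold d i (m + 1) b = dstep d (i : Int) (innerFold d i m b) ((i : Int) + (m : Int)) := by
      unfold innerFold
      rw [show (i : Int) + ((m + 1 : Nat) : Int) = ((i : Int) + (m : Int)) + 1 by push_cast; ring,
        PySem.List.pyRange_one_succ_right (by omega), List.foldl_append, List.foldl_cons,
        List.foldl_nil]
    have hsm : (innerFold d i m b).1 + PySem.List.pyGetD d ((i : Int) + (m : Int)) 0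
        = psum d (i + m + 1) - psum d i := by
      have hlt : i + m < d.length := by omega
      rw [hs, show (i : Int) + (m : Int) = ((i + m : Nat) : Int) by push_cast; ring,
        PySem.List.pyGetD_natCast, List.getD_eq_getElem d 0 hlt, psum_succ d (i + m) hlt]
      ring
    rw [hstep]
    unfold dstep
    dsimp only
    rw [hsm]
    by_cases h0 : psum d (i + m + 1) - psum d i = 0
    · rw [if_pos (by simpa using h0)]
      have heq : psum d (i + m + 1) = psum d i := by omega
      have hval : ((i : Int) + (m : Int)) - (i : Int) + 1 = (m : Int) + 1 := by ring
      refine ⟨by rw [show i + (m + 1) = i + m + 1 by omega],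
        le_trans hb (le_max_of_le_left (le_refl _)), ?_, ?_⟩
      · intro k hk hps
        rcases Nat.lt_succ_iff_lt_or_eq.mp hk with h | h
        · exact le_trans (hlb k h hps) (le_max_of_le_left (le_refl _))
        · subst h; rw [hval]; exact le_max_of_le_right (le_refl _)
      · rcases le_total (innerFold d i m b).2 (((i : Int) + (m : Int)) - (i : Int) + 1) with h | h
        · right
          exact ⟨m, Nat.lt_succ_self m, heq, by rw [max_eq_right h, hval]⟩
        · rw [max_eq_left h]
          rcases hwit with h' | ⟨k, hk, hps, hv⟩
          · exact Or.inl h'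
          · exact Or.inr ⟨k, by omega, hps, hv⟩
    · rw [if_neg (by simpa using h0)]
      refine ⟨by rw [show i + (m + 1) = i + m + 1 by omega], hb, ?_, ?_⟩
      · intro k hk hps
        rcases Nat.lt_succ_iff_lt_or_eq.mp hk with h | h
        · exact hlb k h hps
        · subst h; exact absurd (by omega : psum d (i + k + 1) - psum d i = 0) h0
      · rcases hwit with h' | ⟨k, hk, hps, hv⟩
        · exact Or.inl h'
        · exact Or.inr ⟨k, by omega, hps, hv⟩

theorem pvInner_eq (arr1 arr2 : List Int) (h : arr1.length ≤ arr2.length) (i : Nat)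
    (hi : i ≤ arr1.length) (b : Int) :
    pvInner arr1 arr2 (arr1.length : Int) (i : Int) b
      = (innerFold ((arr1.zip arr2).map (fun ab => ab.1 - ab.2)) i (arr1.length - i) b).2 := by
  unfold pvInner innerFold
  have hrng : (i : Int) + ((arr1.length - i : Nat) : Int) = (arr1.length : Int) := by
    push_cast [hi]; ring
  rw [hrng]
  congr 1
  apply PySem.List.foldl_congr_mem
  intro acc j hj
  obtain ⟨hj1, hj2⟩ := PySem.List.mem_pyRange_one.mp hj
  have hj0 : 0 ≤ j := le_trans (by positivity) hj1
  have hjn : j.toNat < arr1.length := by omega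
  have hjn2 : j.toNat < arr2.length := by omega
  have hd : PySem.List.pyGetD arr1 j 0 - PySem.List.pyGetD arr2 j 0
      = PySem.List.pyGetD ((arr1.zip arr2).map (fun ab => ab.1 - ab.2)) j 0 := by
    rw [PySem.List.pyGetD_of_nonneg _ _ hj0, PySem.List.pyGetD_of_nonneg _ _ hj0,
      PySem.List.pyGetD_of_nonneg _ _ hj0,
      List.getD_eq_getElem _ _ hjn, List.getD_eq_getElem _ _ hjn2,
      List.getD_eq_getElem _ _ (by simp [List.length_zip]; omega)]
    simp [List.getElem_zip]
  unfold dstep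
  dsimp only
  rw [hd]

theorem outer_spec (arr1 arr2 : List Int) (h : arr1.length ≤ arr2.length) : ∀ t : Nat,
    t ≤ arr1.length →
    (0 ≤ (PySem.List.pyRange 0 (t : Int) 1).foldl
        (fun best i => pvInner arr1 arr2 (arr1.length : Int) i best) 0) ∧
    (∀ i k : Nat, i < t → i + k < arr1.length →
      psum ((arr1.zip arr2).map (fun ab => ab.1 - ab.2)) (i + k + 1)
        = psum ((arr1.zip arr2).map (fun ab => ab.1 - ab.2)) i →
      (k : Int) + 1 ≤ (PySem.List.pyRange 0 (t : Int) 1).foldl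
        (fun best i => pvInner arr1 arr2 (arr1.length : Int) i best) 0) ∧
    ((PySem.List.pyRange 0 (t : Int) 1).foldl
        (fun best i => pvInner arr1 arr2 (arr1.length : Int) i best) 0 = 0 ∨
      ∃ i k : Nat, i + k < arr1.length ∧
        psum ((arr1.zip arr2).map (fun ab => ab.1 - ab.2)) (i + k + 1)
          = psum ((arr1.zip arr2).map (fun ab => ab.1 - ab.2)) i ∧
        (PySem.List.pyRange 0 (t : Int) 1).foldl
          (fun best i => pvInner arr1 arr2 (arr1.length : Int) i best) 0 = (k : Int) + 1) := by
  intro t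
  induction t with
  | zero =>
    intro _
    rw [Nat.cast_zero, PySem.List.pyRange_one_eq_nil (le_refl 0), List.foldl_nil]
    exact ⟨le_refl 0, by omega, Or.inl rfl⟩
  | succ t ih =>
    intro ht
    obtain ⟨h0, hlb, hwit⟩ := ih (by omega)
    set d := (arr1.zip arr2).map (fun ab => ab.1 - ab.2) with hd
    have hdl : d.length = arr1.length := by simp [hd, List.length_zip]; omega
    set V := (PySem.List.pyRange 0 (t : Int) 1).foldl
      (fun best i => pvInner arr1 arr2 (arr1.length : Int) i best) 0 with hV
    have hstep : (PySem.List.pyRange 0 ((t + 1 : Nat) : Int) 1).foldl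
        (fun best i => pvInner arr1 arr2 (arr1.length : Int) i best) 0
        = pvInner arr1 arr2 (arr1.length : Int) (t : Int) V := by
      rw [show ((t + 1 : Nat) : Int) = (t : Int) + 1 by push_cast; ring,
        PySem.List.pyRange_one_succ_right (by positivity), List.foldl_append, List.foldl_cons,
        List.foldl_nil]
    have hin := pvInner_eq arr1 arr2 h t (by omega) V
    obtain ⟨_, hb, hilb, hiwit⟩ := inner_spec d t (arr1.length - t) V (by omega)
    rw [hstep, hin, ← hd]
    refine ⟨le_trans h0 hb, ?_, ?_⟩
    · intro i k hi hik hps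
      rcases Nat.lt_succ_iff_lt_or_eq.mp hi with h' | h'
      · exact le_trans (hlb i k h' hik hps) hb
      · subst h'
        exact hilb k (by omega) hps
    · rcases hiwit with h' | ⟨k, hk, hps, hv⟩
      · rw [h']
        rcases hwit with h'' | ⟨i, k, hik, hps, hv⟩
        · exact Or.inl h''
        · exact Or.inr ⟨i, k, hik, hps, hv⟩
      · exact Or.inr ⟨t, k, by omega, hps, hv⟩

theorem max_window_unique (d : List Int) (V W : Int)
    (hV0 : 0 ≤ V) (hW0 : 0 ≤ W)
    (hVlb : ∀ i k : Nat, i + k < d.length → psum d (i + k + 1) = psum d i → (k : Int) + 1 ≤ V)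
    (hWlb : ∀ i k : Nat, i + k < d.length → psum d (i + k + 1) = psum d i → (k : Int) + 1 ≤ W)
    (hVw : V = 0 ∨ ∃ i k : Nat, i + k < d.length ∧ psum d (i + k + 1) = psum d i ∧ V = (k : Int) + 1)
    (hWw : W = 0 ∨ ∃ i k : Nat, i + k < d.length ∧ psum d (i + k + 1) = psum d i ∧ W = (k : Int) + 1) :
    V = W := by
  apply le_antisymm
  · rcases hVw with h | ⟨i, k, h1, h2, h3⟩
    · omega
    · rw [h3]; exact hWlb i k h1 h2
  · rcases hWw with h | ⟨i, k, h1, h2, h3⟩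
    · omega
    · rw [h3]; exact hVlb i k h1 h2

-- ===== VERDICT (by name: the statement is the Claim_ definition above) =====
theorem longest_common_subarr_2_arr_spec : Claim_equal_longest_common_subarr_2_arr := by
  intro arr1 arr2 _ hpre
  unfold Spec_longest_common_subarr_2_arr
  have hpre' : arr1.length ≤ arr2.length := hpre
  set d := (arr1.zip arr2).map (fun ab => ab.1 - ab.2) with hd
  have hdl : d.length = arr1.length := by simp [hd, List.length_zip]; omega
  have hA : longest_common_subarr_2_arr arr1 arr2 = ref d d.length := by
    rw [longest_common_subarr_2_arr, lcsa_diff_eq arr1 arr2 hpre, ← hd, lcsa_A_eq_ref]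
  obtain ⟨hB0, hBlb, hBw⟩ := outer_spec arr1 arr2 hpre arr1.length (le_refl _)
  rw [hA]
  apply max_window_unique d
  · exact ref_nonneg d d.length
  · exact hB0
  · intro i k h1 h2; exact ref_lb d i k h1 h2
  · intro i k h1 h2; rw [hdl] at h1; exact hBlb i k (by omega) (by omega) h2
  · rcases ref_wit d d.length (le_refl _) with h | ⟨i, k, h1, h2, h3⟩
    · exact Or.inl h
    · exact Or.inr ⟨i, k, h1, h2, h3⟩
  · rcases hBw with h | ⟨i, k, h1, h2, h3⟩
    · exact Or.inl h
    · exact Or.inr ⟨i, k, by omega, h2, h3⟩
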